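-- pv_equiv track=rewrite | github.com/ryanmontogomory-hue/Injector | security_enhancements.py | sanitize_email
-- ===== SOURCE A (Python) =====
-- def sanitize_email(email: str) -> str:
--     """Sanitize email input."""
--     if not email:
--         return ""
--     # Remove potentially dangerous characters
--     dangerous_chars = ['<', '>', '"', "'", '&', '\n', '\r', '\t']
--     sanitized = email.strip()
--     for char in dangerous_chars:
--         sanitized = sanitized.replace(char, '')
--     return sanitized
-- ===== SOURCE B (Python) =====
-- def sanitize_email(email: str) -> str:
--     """Sanitize email input."""
--     if not email:
--         return ""
--     dangerous = {'<', '>', '"', "'", '&', '\n', '\r', '\t'}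
--     return ''.join(c for c in email.strip() if c not in dangerous)
-- ===== Notes on version B (the rewrite author's own statement) =====
-- stated objective: idiomatic
-- what changed: replaces eight sequential full-string .replace() passes with one filtering pass over the stripped string's characters against a set of dangerous characters
import Mathlib
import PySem

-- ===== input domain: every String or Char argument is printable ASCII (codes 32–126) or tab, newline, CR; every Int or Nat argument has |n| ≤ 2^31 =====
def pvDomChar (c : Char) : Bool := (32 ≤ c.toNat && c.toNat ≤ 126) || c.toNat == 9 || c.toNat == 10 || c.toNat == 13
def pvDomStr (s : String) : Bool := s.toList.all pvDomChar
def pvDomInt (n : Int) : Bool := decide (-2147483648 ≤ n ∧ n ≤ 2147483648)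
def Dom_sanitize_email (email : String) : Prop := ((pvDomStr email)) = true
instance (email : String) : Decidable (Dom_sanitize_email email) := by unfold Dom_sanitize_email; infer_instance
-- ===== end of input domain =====

-- B replaces A's eight sequential full-string .replace() passes with one filtering pass over the stripped string's characters (idiomatic; same return value).


-- ===== PORT A =====
-- dangerous_chars = ['<', '>', '"', "'", '&', '\n', '\r', '\t']
def pvDangerousA : List String := ["<", ">", "\"", "'", "&", "\n", "\r", "\t"]

def sanitize_email (email : String) : String :=
  if email = "" then ""
  else
    -- sanitized = email.strip(); for char in dangerous_chars: sanitized = sanitized.replace(char, '')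
    pvDangerousA.foldl (fun sanitized ch => PySem.Str.replace sanitized ch "") (PySem.Str.strip email)

-- ===== PORT B =====
def pvDangerousB : List Char := ['<', '>', '"', '\'', '&', '\n', '\r', '\t']

def sanitize_email_alt (email : String) : String :=
  if email = "" then ""
  else String.ofList (((PySem.Str.strip email).toList).filter (fun c => !(pvDangerousB.contains c)))

-- ===== PRECONDITION & SPEC =====
def Spec_sanitize_email (email : String) (out : String) : Prop := out = sanitize_email_alt email
instance (email : String) (out : String) : Decidable (Spec_sanitize_email email out) := by unfold Spec_sanitize_email; infer_instance

-- ===== CLAIM (what is proved, stated in full; the proofs are below) =====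
def Claim_equal_sanitize_email : Prop := ∀ (email : String), Dom_sanitize_email email → Spec_sanitize_email email (sanitize_email email)

-- ===== LEMMAS AND PROOFS =====
-- PySem.Chars.replace.go with a one-character pattern and empty replacement is a filter.
lemma go_filter (ch : Char) : ∀ (fuel : Nat) (l acc : List Char), l.length ≤ fuel →
    PySem.Chars.replace.go [ch] [] fuel l acc = acc.reverse ++ l.filter (fun c => !(c == ch)) := by
  intro fuel
  induction fuel with
  | zero => intro l acc h; cases l with
    | nil => simp [PySem.Chars.replace.go]
    | cons c t => simp at h
  | succ n ih =>
    intro l acc h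
    cases l with
    | nil => simp [PySem.Chars.replace.go]
    | cons c t =>
      simp only [PySem.Chars.replace.go]
      by_cases hc : c = ch
      · subst hc
        simp [List.isPrefixOf, ih t acc (by simpa using h)]
      · have hp : [ch].isPrefixOf (c :: t) = false := by
          simp [List.isPrefixOf]; exact fun h' => hc h'.symm
        simp [hp, ih t (c :: acc) (by simpa using h), hc]

lemma replace_filter (s : List Char) (ch : Char) :
    PySem.Chars.replace s [ch] [] = s.filter (fun c => !(c == ch)) := by
  simp [PySem.Chars.replace, go_filter ch s.length s [] (le_refl _)]

-- s.replace(single char, '') = filter that drops the character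
lemma replace_one (s : String) (ch : Char) :
    PySem.Str.replace s (String.ofList [ch]) "" = String.ofList (s.toList.filter (fun c => !(c == ch))) := by
  unfold PySem.Str.replace
  rw [String.toList_ofList, show ("" : String).toList = [] from rfl, replace_filter]

-- ===== VERDICT =====
theorem sanitize_email_spec : Claim_equal_sanitize_email := by
  intro email _
  unfold Spec_sanitize_email sanitize_email sanitize_email_alt pvDangerousA pvDangerousB
  by_cases h : email = ""
  · simp [h]
  · simp only [if_neg h, List.foldl]
    rw [show ("<" : String) = String.ofList ['<'] from rfl,
        show (">" : String) = String.ofList ['>'] from rfl,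
        show ("\"" : String) = String.ofList ['"'] from rfl,
        show ("'" : String) = String.ofList ['\''] from rfl,
        show ("&" : String) = String.ofList ['&'] from rfl,
        show ("\n" : String) = String.ofList ['\n'] from rfl,
        show ("\r" : String) = String.ofList ['\r'] from rfl,
        show ("\t" : String) = String.ofList ['\t'] from rfl]
    simp only [replace_one, String.toList_ofList, List.filter_filter]
    congr 1
    apply List.filter_congr
    intro c _
    simp only [List.contains_cons, List.contains_nil, Bool.or_false, Bool.not_or]
    ac_rfl
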